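-- pv_equiv track=rewrite | github.com/Lab41/pythia | src/pipelines/data_gen.py | encode_doc
-- ===== SOURCE A (Python) =====
-- def encode_doc(doc, vocab, oov_strategy='skip'):
--     """
--     Integer-encode doc according to vocab. Options for
--     how to treat out-of-vocabulary tokens
--
--     Args:
--         doc (list): list of tokens to encode
--         vocab (dict): mapping of tokens to integer codes
--         oov_strategy (str or int): if 'skip', leave out-of-vocab tokens
--             out of result. If 'none', replace oov tokens with None. If
--             any integer, replace oov tokens with that integer.
--     Returns:
--         list of integers (and possibly None)
--     """
--
--     if oov_strategy == 'skip':
--         doc = strip_to_vocab(doc, vocab)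
--         oov_code = None
--     elif type(oov_strategy) is int:
--         oov_code = oov_strategy
--     elif oov_strategy is None:
--         oov_code = None
--
--     encoded_doc = [ vocab.get(tkn, oov_code) for tkn in doc ]
--     return encoded_doc
--
-- def strip_to_vocab(doc, vocab):
--     """ Remove from doc any tokens not in vocab.
--
--     Args:
--         doc (list): list of tokens
--         vocab (dict): keys overlap with tokens in doc
--
--     Returns:
--         list
--     """
--     return [ tkn for tkn in doc if tkn in vocab ]
-- ===== SOURCE B (Python) =====
-- def encode_doc(doc, vocab, oov_strategy='skip'):
--     """Single fused pass over doc instead of A's strip-then-encode two-pass."""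
--     skip = oov_strategy == 'skip'
--     oov_code = oov_strategy if type(oov_strategy) is int else None
--     encoded_doc = []
--     for tkn in doc:
--         if tkn in vocab:
--             encoded_doc.append(vocab[tkn])
--         elif skip:
--             continue
--         else:
--             encoded_doc.append(oov_code)
--     return encoded_doc
-- ===== Notes on version B (the rewrite author's own statement) =====
-- stated objective: alternative
-- what changed: Fuses A's two-pass strip-to-vocab-then-encode comprehension into one explicit loop that per token appends the code, skips, or appends the OOV code; the given Lean signature types oov_strategy as Option String, so integer strategies (which both Pythons handle identically) are not representable in the ported domain, and Pre_ excludes only the inputs where A raises NameError on its unbound oov_code (non-empty doc with a string strategy other than 'skip').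
import Mathlib
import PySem

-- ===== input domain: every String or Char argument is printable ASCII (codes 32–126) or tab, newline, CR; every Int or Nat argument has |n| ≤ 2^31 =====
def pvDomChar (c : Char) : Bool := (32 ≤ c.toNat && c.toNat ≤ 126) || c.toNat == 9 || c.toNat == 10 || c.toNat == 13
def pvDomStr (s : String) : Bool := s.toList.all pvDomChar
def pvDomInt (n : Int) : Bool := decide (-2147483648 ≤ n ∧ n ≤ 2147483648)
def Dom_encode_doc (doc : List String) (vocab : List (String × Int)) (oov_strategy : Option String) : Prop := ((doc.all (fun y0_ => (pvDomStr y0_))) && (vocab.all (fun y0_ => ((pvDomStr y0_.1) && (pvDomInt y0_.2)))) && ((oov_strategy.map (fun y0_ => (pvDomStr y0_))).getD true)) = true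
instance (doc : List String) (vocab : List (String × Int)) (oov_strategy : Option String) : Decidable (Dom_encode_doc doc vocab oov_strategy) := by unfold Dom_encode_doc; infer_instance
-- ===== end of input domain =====

-- B fuses A's strip-then-encode two-pass 'skip' path into one per-token loop (objective: alternative, same cost).

-- ===== PORT A =====
-- strip_to_vocab: [tkn for tkn in doc if tkn in vocab]
def pvStripToVocab (doc : List String) (vocab : PySem.Dict String Int) : List String :=
  doc.filter (fun tkn => vocab.contains tkn)

def encode_doc (doc : List String) (vocab : List (String × Int)) (oov_strategy : Option String) : List (Option Int) :=
  let v := PySem.Dict.mk vocab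
  -- in this signature oov_strategy is a string or None (integer strategies are outside the
  -- Option String type given for the port), so the oov_code set by A's branch chain is always
  -- None whenever it is bound, and vocab.get(tkn, oov_code) is get?
  let doc' := if oov_strategy = some "skip" then pvStripToVocab doc v else doc
  doc'.map (fun tkn => v.get? tkn)

-- ===== PORT B =====
-- the fused loop of Source B: append the code, skip, or append the (None) oov_code per token
def pvEncodeLoop (vocab : PySem.Dict String Int) (skip : Bool) : List String → List (Option Int)
  | [] => []
  | tkn :: rest =>
    match vocab.get? tkn with
    | some c => some c :: pvEncodeLoop vocab skip rest
    | none => if skip then pvEncodeLoop vocab skip rest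
              else none :: pvEncodeLoop vocab skip rest

def encode_doc_alt (doc : List String) (vocab : List (String × Int)) (oov_strategy : Option String) : List (Option Int) :=
  let skip := oov_strategy = some "skip"
  pvEncodeLoop (PySem.Dict.mk vocab) skip doc

-- ===== PRECONDITION & SPEC =====
-- Within the given Option-String strategy type, Pre_ excludes exactly the inputs on which A raises:
-- a non-empty doc with a string strategy other than 'skip' (and not None) makes A's comprehension
-- read the unbound local oov_code (NameError); Python integer strategies are not representable in
-- this signature at all. Pre_ excludes no representable input on which A returns.
def Pre_encode_doc (doc : List String) (vocab : List (String × Int)) (oov_strategy : Option String) : Prop :=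
  oov_strategy = some "skip" ∨ oov_strategy = none ∨ doc = []
instance (doc : List String) (vocab : List (String × Int)) (oov_strategy : Option String) : Decidable (Pre_encode_doc doc vocab oov_strategy) := by unfold Pre_encode_doc; infer_instance
def pvWitness_encode_doc : List String × (List (String × Int)) × Option String :=
  (["a", "b"], [("a", 1)], some "skip")

def Spec_encode_doc (doc : List String) (vocab : List (String × Int)) (oov_strategy : Option String) (out : List (Option Int)) : Prop := out = encode_doc_alt doc vocab oov_strategy
instance (doc : List String) (vocab : List (String × Int)) (oov_strategy : Option String) (out : List (Option Int)) : Decidable (Spec_encode_doc doc vocab oov_strategy out) := by unfold Spec_encode_doc; infer_instance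

-- ===== CLAIM (what is proved, stated in full; the proofs are below) =====
def Claim_equal_encode_doc : Prop := ∀ (doc : List String) (vocab : List (String × Int)) (oov_strategy : Option String), Dom_encode_doc doc vocab oov_strategy → Pre_encode_doc doc vocab oov_strategy → Spec_encode_doc doc vocab oov_strategy (encode_doc doc vocab oov_strategy)

-- ===== LEMMAS AND PROOFS =====
-- skip path: filter-then-map equals the fused loop with skip = true
theorem pvLoop_skip (v : PySem.Dict String Int) (doc : List String) :
    (pvStripToVocab doc v).map (fun tkn => v.get? tkn) = pvEncodeLoop v true doc := by
  induction doc with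
  | nil => rfl
  | cons t rest ih =>
    simp only [pvStripToVocab, List.filter_cons, pvEncodeLoop,
      PySem.Dict.contains_eq_isSome_get?] at *
    cases h : v.get? t <;> simp [h, ih]

-- None strategy: plain map equals the fused loop with skip = false
theorem pvLoop_noskip (v : PySem.Dict String Int) (doc : List String) :
    doc.map (fun tkn => v.get? tkn) = pvEncodeLoop v false doc := by
  induction doc with
  | nil => rfl
  | cons t rest ih =>
    simp only [List.map_cons, pvEncodeLoop]
    cases h : v.get? t <;> simp [ih]

-- ===== VERDICT (by name: the statement is the Claim_ definition above) =====
theorem encode_doc_spec : Claim_equal_encode_doc := by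
  intro doc vocab oov _ hpre
  unfold Spec_encode_doc encode_doc encode_doc_alt
  rcases hpre with h | h | h
  · simp [h, pvLoop_skip]
  · simp [h, pvLoop_noskip]
  · subst h
    cases hs : decide (oov = some "skip") <;>
      simp_all [pvStripToVocab, pvEncodeLoop]
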